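-- pv_equiv track=rewrite | github.com/NicolaasZA/euler | solutions/p59.py | generate_passphrase
-- ===== SOURCE A (Python) =====
-- key_vals = [97, 97, 97]
--
-- def generate_passphrase(target_length: int):
--     """Generate a repeating passphrase of the target length"""
--     output = []
--     i = 0
--     while len(output) < target_length:
--         output.append(key_vals[i])
--         i += 1
--         i %= 3
--     return "".join([chr(c) for c in output])
-- ===== SOURCE B (Python) =====
-- key_vals = [97, 97, 97]
--
-- def generate_passphrase(target_length: int):
--     """Generate a repeating passphrase of the target length"""
--     unit = "".join(chr(c) for c in key_vals)
--     return (unit * (target_length // 3 + 1))[:target_length]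
-- ===== Notes on version B (the rewrite author's own statement) =====
-- stated objective: simpler
-- what changed: Replaces A's char-by-char while loop with a modular index by building the repeating unit once from key_vals and tiling/slicing it to the target length in closed form.
import Mathlib
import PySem

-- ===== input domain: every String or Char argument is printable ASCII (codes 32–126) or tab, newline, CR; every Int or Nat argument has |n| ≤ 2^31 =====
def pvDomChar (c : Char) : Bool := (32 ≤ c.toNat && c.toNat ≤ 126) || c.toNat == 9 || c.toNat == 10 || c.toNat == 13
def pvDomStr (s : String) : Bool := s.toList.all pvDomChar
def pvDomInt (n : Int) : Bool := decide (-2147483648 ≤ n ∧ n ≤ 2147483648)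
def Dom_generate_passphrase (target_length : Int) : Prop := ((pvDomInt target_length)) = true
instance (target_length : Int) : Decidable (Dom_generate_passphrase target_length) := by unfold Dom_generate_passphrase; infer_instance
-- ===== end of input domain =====

-- B replaces A's char-by-char while loop (modular counter) with building the unit once and tiling+slicing; objective: simpler.

-- module-level constant shared by both versions
def key_vals : List Int := [97, 97, 97]

-- ===== PORT A =====
-- the while loop: appends key_vals[i], i cycles mod 3, until len(output) reaches target_length
-- (key_vals[i] is always in range here, so the .getD 0 default is never taken)
def genA_loop (target_length : Int) (output : List Int) (i : Int) : List Int :=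
  if output.length < target_length then
    genA_loop target_length (output ++ [(PySem.List.pyGet? key_vals i).getD 0])
      (PySem.Int.mod (i + 1) 3)
  else output
termination_by (target_length - output.length).toNat
decreasing_by
  simp only [List.length_append, List.length_cons, List.length_nil]
  omega

def generate_passphrase (target_length : Int) : String :=
  String.ofList ((genA_loop target_length [] 0).map (fun c => Char.ofNat c.toNat))

-- ===== PORT B =====
def generate_passphrase_alt (target_length : Int) : String :=
  let unit : List Char := key_vals.map (fun c => Char.ofNat c.toNat)
  String.ofList
    (PySem.List.slice (PySem.List.pyRepeat unit (PySem.Int.floordiv target_length 3 + 1))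
      none (some target_length))

-- ===== PRECONDITION & SPEC =====
def Spec_generate_passphrase (target_length : Int) (out : String) : Prop := out = generate_passphrase_alt target_length
instance (target_length : Int) (out : String) : Decidable (Spec_generate_passphrase target_length out) := by unfold Spec_generate_passphrase; infer_instance

-- ===== CLAIM (what is proved, stated in full; the proofs are below) =====
def Claim_equal_generate_passphrase : Prop := ∀ (target_length : Int), Dom_generate_passphrase target_length → Spec_generate_passphrase target_length (generate_passphrase target_length)

-- ===== LEMMAS AND PROOFS =====

lemma genA_loop_eq (n : Nat) : ∀ (t : Int) (output : List Int) (i : Int),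
    (t - output.length).toNat = n → 0 ≤ i → i < 3 →
    genA_loop t output i = output ++ List.replicate n 97 := by
  induction n with
  | zero =>
    intro t output i hn _ _
    rw [genA_loop]
    rw [if_neg (by omega)]
    simp
  | succ m ih =>
    intro t output i hn hi0 hi3
    rw [genA_loop]
    rw [if_pos (by omega)]
    have hval : (PySem.List.pyGet? key_vals i).getD 0 = 97 := by
      interval_cases i <;> decide
    have hmod0 : 0 ≤ PySem.Int.mod (i + 1) 3 := by
      interval_cases i <;> decide
    have hmod3 : PySem.Int.mod (i + 1) 3 < 3 := by
      interval_cases i <;> decide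
    rw [hval, ih t (output ++ [97]) _ (by simp; omega) hmod0 hmod3]
    simp [List.replicate_succ]

lemma pyRepeat_replicate (k : Nat) (n : Int) (c : Char) :
    PySem.List.pyRepeat (List.replicate k c) n = List.replicate (k * n.toNat) c := by
  simp only [PySem.List.pyRepeat]
  induction n.toNat with
  | zero => simp
  | succ m ih =>
    simp only [List.replicate_succ, List.flatten_cons]
    rw [ih]
    rw [← List.replicate_add]
    congr 1
    ring

theorem generate_passphrase_spec : Claim_equal_generate_passphrase := by
  intro t _
  unfold Spec_generate_passphrase generate_passphrase generate_passphrase_alt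
  have hA : genA_loop t [] 0 = List.replicate t.toNat 97 :=
    genA_loop_eq t.toNat t [] 0 (by simp) (by decide) (by decide)
  rw [hA]
  have hunit : key_vals.map (fun c => Char.ofNat c.toNat) = List.replicate 3 'a' := by decide
  rw [hunit]
  show _ = String.ofList (PySem.List.slice (PySem.List.pyRepeat (List.replicate 3 'a') (PySem.Int.floordiv t 3 + 1)) none (some t))
  rw [pyRepeat_replicate]
  have hmap : (List.replicate t.toNat (97 : Int)).map (fun c => Char.ofNat c.toNat)
      = List.replicate t.toNat 'a' := by
    rw [List.map_replicate]
    simp only [show Char.ofNat (Int.toNat 97) = 'a' from by decide]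
  rw [hmap]
  have hq : PySem.Int.floordiv t 3 < PySem.Int.floordiv t 3 + 1 := by omega
  have hqt : t < (PySem.Int.floordiv t 3 + 1) * 3 :=
    (PySem.Int.floordiv_lt_iff_lt_mul (a:=t) (b:=3) (by decide)).mp hq
  by_cases ht : 0 ≤ t
  · have hq1 : 1 ≤ PySem.Int.floordiv t 3 + 1 := by
      have h0 : 0 * 3 ≤ t := by omega
      have := (PySem.Int.le_floordiv_iff_mul_le (a:=t) (b:=3) (q:=0) (by decide)).mpr h0
      omega
    rw [PySem.List.slice_to (b:=t) _ ht]
    rw [List.take_replicate]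
    rw [Nat.min_eq_left (by omega)]
  · have hq0 : (PySem.Int.floordiv t 3 + 1).toNat = 0 := by
      have h0 : t < 0 * 3 := by omega
      have := (PySem.Int.floordiv_lt_iff_lt_mul (a:=t) (b:=3) (q:=0) (by decide)).mpr h0
      omega
    rw [hq0]
    simp [PySem.List.slice]
    omega
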